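-- pv_equiv track=rewrite | github.com/Makhafagy/my-job-journey | compare_applied.py | detect_url_key
-- ===== SOURCE A (Python) =====
-- from typing import Set, Dict, List, Optional
--
-- def detect_url_key(fieldnames: List[str]) -> Optional[str]:
--     """Return the header name that's most likely the URL/apply link column."""
--     if not fieldnames:
--         return None
--     for h in fieldnames:
--         hn = (h or "").strip().lower()
--         if hn == "apply_url" or hn == "apply-url" or hn == "apply url":
--             return h
--     for h in fieldnames:
--         hn = (h or "").strip().lower()
--         if "apply" in hn and ("url" in hn or "link" in hn):
--             return h
--     for h in fieldnames:
--         hn = (h or "").strip().lower()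
--         if "url" in hn or "link" in hn:
--             return h
--     return None
-- ===== SOURCE B (Python) =====
-- def _tier(h):
--     hn = (h or "").strip().lower()
--     if hn == "apply_url" or hn == "apply-url" or hn == "apply url":
--         return 1
--     if "apply" in hn and ("url" in hn or "link" in hn):
--         return 2
--     if "url" in hn or "link" in hn:
--         return 3
--     return 4
--
-- def detect_url_key(fieldnames):
--     best_t, best_h = 4, None
--     for h in fieldnames:
--         t = _tier(h)
--         if t < best_t:
--             best_t, best_h = t, h
--     return best_h
-- ===== Notes on version B (the rewrite author's own statement) =====
-- stated objective: simpler
-- what changed: Replaces A's three sequential scans of the header list by a single pass that assigns each header a numeric priority tier (1 exact apply-url name, 2 apply+url/link, 3 url/link) and keeps the earliest header with the strictly smallest tier.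
import Mathlib
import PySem

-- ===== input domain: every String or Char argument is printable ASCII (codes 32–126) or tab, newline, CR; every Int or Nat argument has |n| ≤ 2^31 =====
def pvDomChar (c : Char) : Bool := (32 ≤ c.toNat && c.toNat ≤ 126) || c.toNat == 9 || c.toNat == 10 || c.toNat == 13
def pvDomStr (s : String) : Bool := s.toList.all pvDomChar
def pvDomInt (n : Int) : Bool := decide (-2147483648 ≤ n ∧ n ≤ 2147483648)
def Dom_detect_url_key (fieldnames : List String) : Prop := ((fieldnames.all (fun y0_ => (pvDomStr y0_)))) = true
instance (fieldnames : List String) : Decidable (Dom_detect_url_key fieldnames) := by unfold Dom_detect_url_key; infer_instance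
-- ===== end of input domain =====

-- B replaces A's three sequential scans by a single pass keeping the earliest header of strictly smallest priority tier (objective: simpler).

-- ===== PORT A =====
-- hn = (h or "").strip().lower()
def aNorm (h : String) : String := PySem.Str.lower (PySem.Str.strip (if h = "" then "" else h))
-- condition of A's first loop
def aCond1 (h : String) : Bool :=
  let hn := aNorm h
  hn == "apply_url" || hn == "apply-url" || hn == "apply url"
-- condition of A's second loop
def aCond2 (h : String) : Bool :=
  let hn := aNorm h
  PySem.Str.isIn "apply" hn && (PySem.Str.isIn "url" hn || PySem.Str.isIn "link" hn)
-- condition of A's third loop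
def aCond3 (h : String) : Bool :=
  let hn := aNorm h
  PySem.Str.isIn "url" hn || PySem.Str.isIn "link" hn

def detect_url_key (fieldnames : List String) : Option String :=
  if fieldnames = [] then none
  else
    match fieldnames.find? aCond1 with
    | some h => some h
    | none =>
      match fieldnames.find? aCond2 with
      | some h => some h
      | none =>
        match fieldnames.find? aCond3 with
        | some h => some h
        | none => none

-- ===== PORT B =====
-- _tier(h) from Source B
def pvTier (h : String) : Nat :=
  if aCond1 h then 1 else if aCond2 h then 2 else if aCond3 h then 3 else 4

-- the single pass over fieldnames with accumulator (best_t, best_h)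
def bLoop : List String → Nat → Option String → Option String
  | [], _, best_h => best_h
  | h :: rest, best_t, best_h =>
    let t := pvTier h
    if t < best_t then bLoop rest t (some h) else bLoop rest best_t best_h

def detect_url_key_alt (fieldnames : List String) : Option String :=
  bLoop fieldnames 4 none

-- ===== PRECONDITION & SPEC =====
def Spec_detect_url_key (fieldnames : List String) (out : Option String) : Prop := out = detect_url_key_alt fieldnames
instance (fieldnames : List String) (out : Option String) : Decidable (Spec_detect_url_key fieldnames out) := by unfold Spec_detect_url_key; infer_instance

-- ===== CLAIM (what is proved, stated in full; the proofs are below) =====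
def Claim_equal_detect_url_key : Prop := ∀ (fieldnames : List String), Dom_detect_url_key fieldnames → Spec_detect_url_key fieldnames (detect_url_key fieldnames)

-- ===== LEMMAS AND PROOFS =====

-- minimum tier of a list, folded onto an initial value t
def mint (fs : List String) (t : Nat) : Nat := fs.foldr (fun h m => min (pvTier h) m) t

theorem mint_nil (t : Nat) : mint [] t = t := rfl

theorem mint_cons' (h : String) (fs : List String) (t : Nat) :
    mint (h :: fs) t = min (pvTier h) (mint fs t) := rfl

theorem mint_min (fs : List String) (a b : Nat) :
    mint fs (min a b) = min (mint fs a) b := by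
  induction fs with
  | nil => rfl
  | cons h rest ih =>
    simp only [mint_cons', ih]
    omega

theorem cond1_imp_cond2 (h : String) (h1 : aCond1 h = true) : aCond2 h = true := by
  simp only [aCond1, Bool.or_eq_true, beq_iff_eq] at h1
  simp only [aCond2]
  rcases h1 with (h1 | h1) | h1 <;> rw [h1] <;> decide

theorem cond2_imp_cond3 (h : String) (h2 : aCond2 h = true) : aCond3 h = true := by
  simp only [aCond2, Bool.and_eq_true] at h2
  simp only [aCond3]
  exact h2.2

theorem tier_ge_one (h : String) : 1 ≤ pvTier h := by
  unfold pvTier; split_ifs <;> omega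

theorem tier_eq_one_iff (h : String) : pvTier h = 1 ↔ aCond1 h = true := by
  unfold pvTier; split_ifs with h1 h2 h3 <;> simp_all

theorem tier_le_two_iff (h : String) : pvTier h ≤ 2 ↔ aCond2 h = true := by
  unfold pvTier
  split_ifs with h1 h2 h3 <;> simp_all [cond1_imp_cond2]

theorem tier_le_three_iff (h : String) : pvTier h ≤ 3 ↔ aCond3 h = true := by
  unfold pvTier
  split_ifs with h1 h2 h3
  · simp [cond2_imp_cond3 _ (cond1_imp_cond2 _ h1)]
  · simp [cond2_imp_cond3 _ h2]
  · simp [h3]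
  · simp_all

theorem mint_le_of_mem {h : String} {fs : List String} (t : Nat) (hm : h ∈ fs) :
    mint fs t ≤ pvTier h := by
  induction fs with
  | nil => cases hm
  | cons x rest ih =>
    rw [mint_cons']
    rcases List.mem_cons.mp hm with rfl | hm'
    · omega
    · have := ih hm'; omega

theorem mint_attained (fs : List String) (t : Nat) :
    mint fs t = t ∨ ∃ h ∈ fs, mint fs t = pvTier h := by
  induction fs with
  | nil => exact Or.inl rfl
  | cons x rest ih =>
    rw [mint_cons']
    by_cases hx : pvTier x ≤ mint rest t
    · exact Or.inr ⟨x, List.mem_cons_self, by omega⟩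
    · rcases ih with h | ⟨h, hmem, heq⟩
      · left; omega
      · right; exact ⟨h, List.mem_cons_of_mem _ hmem, by omega⟩

theorem mint_le_init (fs : List String) (t : Nat) : mint fs t ≤ t := by
  induction fs with
  | nil => exact le_refl _
  | cons x rest ih => rw [mint_cons']; omega

-- characterization of the single pass
theorem bLoop_eq (fs : List String) : ∀ (t : Nat) (b : Option String),
    bLoop fs t b =
      if mint fs t < t then fs.find? (fun h => pvTier h == mint fs t) else b := by
  induction fs with
  | nil => intro t b; simp [bLoop, mint_nil]
  | cons h rest ih =>
    intro t b
    simp only [mint_cons', bLoop]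
    by_cases hk : pvTier h < t
    · rw [if_pos hk, ih]
      have hmk : mint rest (pvTier h) = min (mint rest t) (pvTier h) := by
        have h1 : min t (pvTier h) = pvTier h := by omega
        have h2 := mint_min rest t (pvTier h)
        rw [h1] at h2
        exact h2
      by_cases hA : mint rest (pvTier h) < pvTier h
      · have hM : mint rest t < pvTier h := by omega
        have hmin : min (pvTier h) (mint rest t) = mint rest t := by omega
        have hmin2 : min (mint rest t) (pvTier h) = mint rest t := by omega
        simp only [hmin, hmk, hmin2]
        rw [if_pos hM, if_pos (by omega : mint rest t < t),
          List.find?_cons_of_neg (by simp; omega)]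
      · have hM : ¬ (mint rest t < pvTier h) := by omega
        have hmin : min (pvTier h) (mint rest t) = pvTier h := by omega
        simp only [hmin]
        rw [if_neg hA, if_pos hk, List.find?_cons_of_pos (by simp)]
    · rw [if_neg hk, ih]
      by_cases hM : mint rest t < t
      · have hmin : min (pvTier h) (mint rest t) = mint rest t := by omega
        simp only [hmin]
        rw [if_pos hM, if_pos hM, List.find?_cons_of_neg (by simp; omega)]
      · rw [if_neg hM, if_neg (by omega : ¬ min (pvTier h) (mint rest t) < t)]

theorem find?_congr_mem {l : List String} {p q : String → Bool}
    (h : ∀ x ∈ l, p x = q x) : l.find? p = l.find? q := by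
  induction l with
  | nil => rfl
  | cons x rest ih =>
    simp only [List.find?_cons]
    rw [h x List.mem_cons_self]
    cases q x with
    | true => rfl
    | false => exact ih (fun y hy => h y (List.mem_cons_of_mem _ hy))

theorem find?_isSome_of_mem {l : List String} {p : String → Bool} {x : String}
    (hmem : x ∈ l) (hp : p x = true) : ∃ y, l.find? p = some y := by
  have : (l.find? p).isSome := List.find?_isSome.mpr ⟨x, hmem, hp⟩
  exact Option.isSome_iff_exists.mp this

-- ===== VERDICT (by name: the statement is the Claim_ definition above) =====
theorem detect_url_key_spec : Claim_equal_detect_url_key := by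
  intro fs _
  unfold Spec_detect_url_key detect_url_key detect_url_key_alt
  rw [bLoop_eq]
  rcases List.eq_nil_or_concat fs with rfl | _
  · simp [mint_nil]
  · have hne : fs ≠ [] := by rintro rfl; simp_all
    rw [if_neg hne]
    set m := mint fs 4 with hm
    have hle4 : m ≤ 4 := mint_le_init fs 4
    have hlb : ∀ h ∈ fs, m ≤ pvTier h := fun h hmem => mint_le_of_mem 4 hmem
    interval_cases m
    · -- m = 0 impossible: tiers ≥ 1
      exfalso
      rcases mint_attained fs 4 with h0 | ⟨h, _, heq⟩
      · omega
      · have := tier_ge_one h; omega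
    · -- m = 1 : some header satisfies aCond1
      rcases mint_attained fs 4 with h0 | ⟨h0, hmem, heq⟩
      · omega
      · have hc1 : aCond1 h0 = true := (tier_eq_one_iff h0).mp (by omega)
        have hfind : fs.find? aCond1 = fs.find? (fun h => pvTier h == 1) :=
          find?_congr_mem (fun x _ => by
            by_cases hx : aCond1 x <;>
              simp [hx, tier_eq_one_iff x])
        obtain ⟨y, hy⟩ := find?_isSome_of_mem hmem hc1
        rw [if_pos (by omega), hfind.symm, hy]
    · -- m = 2 : no tier-1 header; first tier-2 header wins A's second loop
      have hnone1 : fs.find? aCond1 = none := by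
        rw [List.find?_eq_none]
        intro x hx hc
        have := (tier_eq_one_iff x).mpr hc
        have := hlb x hx; omega
      rcases mint_attained fs 4 with h0 | ⟨h0, hmem, heq⟩
      · omega
      · have hc2 : aCond2 h0 = true := (tier_le_two_iff h0).mp (by omega)
        have hfind : fs.find? aCond2 = fs.find? (fun h => pvTier h == 2) :=
          find?_congr_mem (fun x hx => by
            have hge := hlb x hx
            by_cases h2 : pvTier x ≤ 2
            · have : pvTier x = 2 := by omega
              simp [this, (tier_le_two_iff x).mp h2]
            · have hc : aCond2 x = false := by
                by_contra hc'
                exact h2 ((tier_le_two_iff x).mpr (by simpa using hc'))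
              simp [hc]; omega)
        obtain ⟨y, hy⟩ := find?_isSome_of_mem hmem hc2
        rw [if_pos (by omega), hnone1, hfind.symm, hy]
    · -- m = 3 : no tier-1/2 header; first tier-3 header wins A's third loop
      have hnone1 : fs.find? aCond1 = none := by
        rw [List.find?_eq_none]
        intro x hx hc
        have := (tier_eq_one_iff x).mpr hc
        have := hlb x hx; omega
      have hnone2 : fs.find? aCond2 = none := by
        rw [List.find?_eq_none]
        intro x hx hc
        have := (tier_le_two_iff x).mpr hc
        have := hlb x hx; omega
      rcases mint_attained fs 4 with h0 | ⟨h0, hmem, heq⟩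
      · omega
      · have hc3 : aCond3 h0 = true := (tier_le_three_iff h0).mp (by omega)
        have hfind : fs.find? aCond3 = fs.find? (fun h => pvTier h == 3) :=
          find?_congr_mem (fun x hx => by
            have hge := hlb x hx
            by_cases h3 : pvTier x ≤ 3
            · have : pvTier x = 3 := by omega
              simp [this, (tier_le_three_iff x).mp h3]
            · have hc : aCond3 x = false := by
                by_contra hc'
                exact h3 ((tier_le_three_iff x).mpr (by simpa using hc'))
              simp [hc]; omega)
        obtain ⟨y, hy⟩ := find?_isSome_of_mem hmem hc3
        rw [if_pos (by omega), hnone1, hnone2, hfind.symm, hy]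
    · -- m = 4 : no header matches anything
      have hall : ∀ x ∈ fs, aCond3 x = false := by
        intro x hx
        by_contra hc'
        have := (tier_le_three_iff x).mpr (by simpa using hc')
        have := hlb x hx; omega
      have hnone3 : fs.find? aCond3 = none :=
        List.find?_eq_none.mpr (fun x hx hc => by rw [hall x hx] at hc; cases hc)
      have hnone2 : fs.find? aCond2 = none :=
        List.find?_eq_none.mpr (fun x hx hc => by
          have h3 := cond2_imp_cond3 x hc
          rw [hall x hx] at h3; cases h3)
      have hnone1 : fs.find? aCond1 = none :=
        List.find?_eq_none.mpr (fun x hx hc => by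
          have h3 := cond2_imp_cond3 x (cond1_imp_cond2 x hc)
          rw [hall x hx] at h3; cases h3)
      rw [if_neg (by omega), hnone1, hnone2, hnone3]
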